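-- pv_equiv track=rewrite | github.com/thoth-station/lab | thoth/lab/inspection.py | map_column_to_feature_class
-- ===== SOURCE A (Python) =====
-- def map_column_to_feature_class(column_name: str):
--     """Helper function that maps a column in the original dataframe to a feature class.
--
--     :param column_name: column_name in inspection_df dataframe
--     obtained by process_inspection_results with no columns dropped (drop=False)
--     """
--     # The keys are keywords to help associate each column with the corresponding feature class.
--     software_keys = ["specification__files", "specification__packages", "specification__python__requirements"]
--     script_keys = ["job_log__script", "job_log__stderr", "job_log__stdout", "specification__script"]
--     hardware_keys = [
--         "hwinfo__cpu",
--         "platform__architecture",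
--         "platform__machine",
--         "platform__platform",
--         "platform__processor",
--         "platform__release",
--         "platform__version",
--     ]
--     if any(x in column_name for x in hardware_keys):
--         return "Hardware (ncpus + Platform + Processor)"
--     elif any(x in column_name for x in software_keys):
--         return "Software stack (files, python packages, python requirements)"
--     elif "specification__base" in column_name:
--         return "Base image"
--     elif any(x in column_name for x in script_keys):
--         return "Script (script + sha256 + parameters)"
--     elif "build__requests" in column_name:
--         return "Build request (hardware + memory)"
--     elif "run__requests" in column_name:
--         return "Run request (hardware + memory)"
--     elif "build__exit_code" in column_name:
--         return "Failure build (exit_code)"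
--     elif "job__exit_code" in column_name:
--         return "Failure run/job (exit_code)"
--     elif "job_log__exit_code" in column_name:
--         return "Job Log (exit_code)"
--     else:
--         return "Inspection Result Info"
-- ===== SOURCE B (Python) =====
-- # B: priority-minimisation — a flat keyword->priority map is folded once, keeping the
-- # smallest matching priority (no early return, no cascade), then the class list is indexed.
-- _CLASSES = [
--     "Hardware (ncpus + Platform + Processor)",
--     "Software stack (files, python packages, python requirements)",
--     "Base image",
--     "Script (script + sha256 + parameters)",
--     "Build request (hardware + memory)",
--     "Run request (hardware + memory)",
--     "Failure build (exit_code)",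
--     "Failure run/job (exit_code)",
--     "Job Log (exit_code)",
--     "Inspection Result Info",
-- ]
--
-- _KEYWORD_PRIORITY = {
--     "hwinfo__cpu": 0,
--     "platform__architecture": 0,
--     "platform__machine": 0,
--     "platform__platform": 0,
--     "platform__processor": 0,
--     "platform__release": 0,
--     "platform__version": 0,
--     "specification__files": 1,
--     "specification__packages": 1,
--     "specification__python__requirements": 1,
--     "specification__base": 2,
--     "job_log__script": 3,
--     "job_log__stderr": 3,
--     "job_log__stdout": 3,
--     "specification__script": 3,
--     "build__requests": 4,
--     "run__requests": 5,
--     "build__exit_code": 6,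
--     "job__exit_code": 7,
--     "job_log__exit_code": 8,
-- }
--
--
-- def map_column_to_feature_class(column_name: str):
--     best = len(_CLASSES) - 1  # fallback: Inspection Result Info
--     for keyword, priority in _KEYWORD_PRIORITY.items():
--         if priority < best and keyword in column_name:
--             best = priority
--     return _CLASSES[best]
-- ===== Notes on version B (the rewrite author's own statement) =====
-- stated objective: alternative
-- what changed: Replaces the first-match if/elif cascade with an aggregation: one fold over a flat keyword-to-priority map keeping the smallest matching priority, then an indexed lookup into the class list.
import Mathlib
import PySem

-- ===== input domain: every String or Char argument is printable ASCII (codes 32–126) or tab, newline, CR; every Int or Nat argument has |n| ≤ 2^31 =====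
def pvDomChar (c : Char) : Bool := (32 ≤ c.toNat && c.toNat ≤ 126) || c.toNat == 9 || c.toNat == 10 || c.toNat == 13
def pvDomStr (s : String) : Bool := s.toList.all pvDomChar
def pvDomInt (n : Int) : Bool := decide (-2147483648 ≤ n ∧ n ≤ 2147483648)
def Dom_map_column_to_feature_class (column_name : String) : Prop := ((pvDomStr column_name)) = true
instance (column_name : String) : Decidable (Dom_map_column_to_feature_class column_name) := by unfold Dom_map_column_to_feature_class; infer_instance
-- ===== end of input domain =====

-- B replaces A's first-match if/elif cascade by an aggregation: one fold over a flat
-- keyword→priority map keeping the smallest matching priority, then an indexed lookup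
-- into the class list; objective: alternative (same cost, different control flow).

-- ===== PORT A =====
def map_column_to_feature_class (column_name : String) : String :=
  let software_keys := ["specification__files", "specification__packages", "specification__python__requirements"]
  let script_keys := ["job_log__script", "job_log__stderr", "job_log__stdout", "specification__script"]
  let hardware_keys := ["hwinfo__cpu", "platform__architecture", "platform__machine",
    "platform__platform", "platform__processor", "platform__release", "platform__version"]
  if hardware_keys.any (fun x => PySem.Str.isIn x column_name) then
    "Hardware (ncpus + Platform + Processor)"
  else if software_keys.any (fun x => PySem.Str.isIn x column_name) then
    "Software stack (files, python packages, python requirements)"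
  else if PySem.Str.isIn "specification__base" column_name then
    "Base image"
  else if script_keys.any (fun x => PySem.Str.isIn x column_name) then
    "Script (script + sha256 + parameters)"
  else if PySem.Str.isIn "build__requests" column_name then
    "Build request (hardware + memory)"
  else if PySem.Str.isIn "run__requests" column_name then
    "Run request (hardware + memory)"
  else if PySem.Str.isIn "build__exit_code" column_name then
    "Failure build (exit_code)"
  else if PySem.Str.isIn "job__exit_code" column_name then
    "Failure run/job (exit_code)"
  else if PySem.Str.isIn "job_log__exit_code" column_name then
    "Job Log (exit_code)"
  else
    "Inspection Result Info"

-- ===== PORT B =====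
def pvClasses : List String :=
  ["Hardware (ncpus + Platform + Processor)",
   "Software stack (files, python packages, python requirements)",
   "Base image",
   "Script (script + sha256 + parameters)",
   "Build request (hardware + memory)",
   "Run request (hardware + memory)",
   "Failure build (exit_code)",
   "Failure run/job (exit_code)",
   "Job Log (exit_code)",
   "Inspection Result Info"]

def pvKeywordPriority : List (String × Nat) :=
  [("hwinfo__cpu", 0), ("platform__architecture", 0), ("platform__machine", 0),
   ("platform__platform", 0), ("platform__processor", 0), ("platform__release", 0),
   ("platform__version", 0),
   ("specification__files", 1), ("specification__packages", 1),
   ("specification__python__requirements", 1),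
   ("specification__base", 2),
   ("job_log__script", 3), ("job_log__stderr", 3), ("job_log__stdout", 3),
   ("specification__script", 3),
   ("build__requests", 4), ("run__requests", 5), ("build__exit_code", 6),
   ("job__exit_code", 7), ("job_log__exit_code", 8)]

-- `_CLASSES[best]`: best always lies in [0, 9], so `getD` is exact here.
def map_column_to_feature_class_alt (column_name : String) : String :=
  let best := pvKeywordPriority.foldl
    (fun best kp => if kp.2 < best && PySem.Str.isIn kp.1 column_name then kp.2 else best)
    (pvClasses.length - 1)
  pvClasses.getD best "Inspection Result Info"

-- ===== PRECONDITION & SPEC =====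
def Spec_map_column_to_feature_class (column_name : String) (out : String) : Prop := out = map_column_to_feature_class_alt column_name
instance (column_name : String) (out : String) : Decidable (Spec_map_column_to_feature_class column_name out) := by unfold Spec_map_column_to_feature_class; infer_instance

-- ===== CLAIM (what is proved, stated in full; the proofs are below) =====
def Claim_equal_map_column_to_feature_class : Prop := ∀ (column_name : String), Dom_map_column_to_feature_class column_name → Spec_map_column_to_feature_class column_name (map_column_to_feature_class column_name)

-- ===== LEMMAS AND PROOFS =====

-- Once `best` is ≤ every remaining priority, the fold is the identity.
theorem pvFold_ge (c : String) (l : List (String × Nat)) (b : Nat)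
    (h : ∀ e ∈ l, b ≤ e.2) :
    l.foldl (fun best kp => if kp.2 < best && PySem.Str.isIn kp.1 c then kp.2 else best) b = b := by
  induction l with
  | nil => rfl
  | cons e t ih =>
    have hb : b ≤ e.2 := h e (List.mem_cons_self ..)
    simp only [List.foldl_cons]
    rw [if_neg (by simp [Nat.not_lt.mpr hb])]
    exact ih (fun x hx => h x (List.mem_cons_of_mem _ hx))

-- A same-priority segment folds to `p` iff one of its keywords matches.
theorem pvFold_seg (c : String) (kws : List String) (p b : Nat) (hpb : p < b) :
    (kws.map (fun k => (k, p))).foldl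
      (fun best kp => if kp.2 < best && PySem.Str.isIn kp.1 c then kp.2 else best) b
      = if kws.any (fun x => PySem.Str.isIn x c) then p else b := by
  induction kws with
  | nil => simp
  | cons k t ih =>
    simp only [List.map_cons, List.foldl_cons, List.any_cons]
    by_cases hk : PySem.Str.isIn k c = true
    · rw [if_pos (by simp only [hk, Bool.and_true, decide_eq_true_eq]; exact hpb),
        pvFold_ge c _ p (by simp)]
      simp only [hk, Bool.true_or, if_true]
      
    · simp only [Bool.not_eq_true] at hk
      rw [if_neg (by simp only [hk, Bool.and_false]; exact Bool.false_ne_true), ih]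
      simp only [hk, Bool.false_or]

theorem pvFold_seg_skip (c : String) (kws : List String) (p b : Nat) (hpb : b ≤ p) :
    (kws.map (fun k => (k, p))).foldl
      (fun best kp => if kp.2 < best && PySem.Str.isIn kp.1 c then kp.2 else best) b = b := by
  exact pvFold_ge c _ b (by simp [hpb])

theorem pvFold_seg_append (c : String) (kws : List String) (rest : List (String × Nat))
    (p b : Nat) (hpb : p < b) :
    ((kws.map (fun k => (k, p))) ++ rest).foldl
      (fun best kp => if kp.2 < best && PySem.Str.isIn kp.1 c then kp.2 else best) b
      = if kws.any (fun x => PySem.Str.isIn x c)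
        then rest.foldl (fun best kp => if kp.2 < best && PySem.Str.isIn kp.1 c then kp.2 else best) p
        else rest.foldl (fun best kp => if kp.2 < best && PySem.Str.isIn kp.1 c then kp.2 else best) b := by
  rw [List.foldl_append, pvFold_seg c kws p b hpb]
  split <;> rfl

theorem pvFold_seg_append_skip (c : String) (kws : List String) (rest : List (String × Nat))
    (p b : Nat) (hpb : b ≤ p) :
    ((kws.map (fun k => (k, p))) ++ rest).foldl
      (fun best kp => if kp.2 < best && PySem.Str.isIn kp.1 c then kp.2 else best) b
      = rest.foldl (fun best kp => if kp.2 < best && PySem.Str.isIn kp.1 c then kp.2 else best) b := by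
  rw [List.foldl_append, pvFold_seg_skip c kws p b hpb]

-- ===== VERDICT (by name: the statement is the Claim_ definition above) =====
set_option maxHeartbeats 1600000 in
theorem map_column_to_feature_class_spec : Claim_equal_map_column_to_feature_class := by
  intro c _
  unfold Spec_map_column_to_feature_class map_column_to_feature_class map_column_to_feature_class_alt
  have hsplit : pvKeywordPriority =
      (["hwinfo__cpu", "platform__architecture", "platform__machine", "platform__platform",
        "platform__processor", "platform__release", "platform__version"].map (fun k => (k, 0)))
      ++ (["specification__files", "specification__packages",
           "specification__python__requirements"].map (fun k => (k, 1)))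
      ++ (["specification__base"].map (fun k => (k, 2)))
      ++ (["job_log__script", "job_log__stderr", "job_log__stdout",
           "specification__script"].map (fun k => (k, 3)))
      ++ (["build__requests"].map (fun k => (k, 4)))
      ++ (["run__requests"].map (fun k => (k, 5)))
      ++ (["build__exit_code"].map (fun k => (k, 6)))
      ++ (["job__exit_code"].map (fun k => (k, 7)))
      ++ (["job_log__exit_code"].map (fun k => (k, 8))) := by rfl
  rw [hsplit, show pvClasses.length - 1 = 9 from rfl]
  simp only [List.append_assoc,
    pvFold_seg_append c, pvFold_seg_append_skip c, pvFold_seg c, pvFold_seg_skip c,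
    List.any_cons, List.any_nil, Bool.or_false, Nat.reduceLT, Nat.reduceLeDiff]
  split_ifs <;> rfl
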